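-- pv_equiv track=rewrite | github.com/tccsantos/Data-Analysis | URL_date.py | limpeza
-- ===== SOURCE A (Python) =====
-- def limpeza(dicti, ref):
-- 	lista = []
-- 	for key, values in dicti.items():
-- 		if values[1] == ref:
-- 			lista.append(key)
-- 	for item in lista:
-- 		dicti.pop(item)
-- 	return dicti
-- ===== SOURCE B (Python) =====
-- def limpeza(dicti, ref):
--     # In-place stable compaction with a write pointer: entries to keep are
--     # shifted left over a snapshot of the items, the tail is cut at w, and
--     # the dict is rebuilt in place from the compacted prefix.
--     items = list(dicti.items())
--     w = 0
--     for i in range(len(items)):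
--         k, v = items[i]
--         if v[1] != ref:
--             items[w] = items[i]
--             w += 1
--     del items[w:]
--     dicti.clear()
--     dicti.update(items)
--     return dicti
-- ===== Notes on version B (the rewrite author's own statement) =====
-- stated objective: alternative
-- what changed: A collects the keys to remove in a list and then pops them from the dict one by one; B instead runs a write-pointer compaction over an indexed snapshot of the items (shifting kept entries left in place, truncating at the write index) and rebuilds the dict from that compacted prefix.
import Mathlib
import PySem

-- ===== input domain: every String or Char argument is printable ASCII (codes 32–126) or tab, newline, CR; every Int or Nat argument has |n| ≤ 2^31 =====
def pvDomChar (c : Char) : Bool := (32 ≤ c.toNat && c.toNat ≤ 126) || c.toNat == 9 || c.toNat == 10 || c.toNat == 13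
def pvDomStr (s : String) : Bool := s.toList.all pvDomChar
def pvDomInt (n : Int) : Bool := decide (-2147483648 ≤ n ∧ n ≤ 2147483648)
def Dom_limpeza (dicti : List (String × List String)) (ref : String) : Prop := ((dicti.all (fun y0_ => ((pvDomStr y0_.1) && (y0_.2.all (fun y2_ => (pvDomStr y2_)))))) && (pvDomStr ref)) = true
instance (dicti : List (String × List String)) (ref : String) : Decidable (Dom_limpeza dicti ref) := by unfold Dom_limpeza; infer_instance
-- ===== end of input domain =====

-- B replaces A's collect-keys-then-pop-one-by-one loop pair with a write-pointer
-- compaction over an indexed snapshot of the items, then rebuilds the dict from the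
-- compacted prefix (objective: alternative, same cost). Both Pythons mutate the dict
-- argument in place; the equivalence proved here is about the returned value (the
-- same object in both Pythons).


-- ===== PORT A =====
-- dicti.pop(item): remove the (first) entry with key item
def popKey (d : List (String × List String)) (item : String) : List (String × List String) :=
  d.eraseP (fun kv => kv.1 == item)

def limpeza (dicti : List (String × List String)) (ref : String) : List (String × List String) :=
  -- first loop: lista collects the keys whose values[1] == ref
  let lista := dicti.foldl
    (fun acc kv => if PySem.List.pyGet? kv.2 1 == some ref then acc ++ [kv.1] else acc) []
  -- second loop: pop each collected key from dicti
  lista.foldl (fun d item => popKey d item) dicti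

-- ===== PORT B =====
-- one iteration of the compaction loop: read items[i]; if kept, write it at the
-- write pointer w and advance w (the 'none' branch only totalises the read; i is
-- always in range)
def compactStep (ref : String) (st : List (String × List String) × Nat) (i : Int) :
    List (String × List String) × Nat :=
  match PySem.List.pyGet? st.1 i with
  | none => st
  | some kv =>
    if PySem.List.pyGet? kv.2 1 == some ref then st
    else (st.1.set st.2 kv, st.2 + 1)

def limpeza_alt (dicti : List (String × List String)) (ref : String) : List (String × List String) :=
  -- items = list(dicti.items()); w = 0; for i in range(len(items)): …
  let st := (PySem.List.pyRange 0 (dicti.length : Int) 1).foldl (compactStep ref) (dicti, 0)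
  -- del items[w:]; dicti.clear(); dicti.update(items)
  st.1.take st.2

-- ===== PRECONDITION & SPEC =====
-- Pre_ excludes (a) entries whose value list has fewer than 2 elements, where both
-- Pythons raise IndexError on values[1], and (b) association lists with duplicate
-- keys, which do not denote a Python dict (the dict collapses them before either
-- function runs), so the list-level behaviour there is accidental.
def Pre_limpeza (dicti : List (String × List String)) (ref : String) : Prop :=
  (dicti.map Prod.fst).Nodup ∧ ∀ kv ∈ dicti, 2 ≤ kv.2.length

instance (dicti : List (String × List String)) (ref : String) : Decidable (Pre_limpeza dicti ref) := by
  unfold Pre_limpeza; infer_instance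

def pvWitness_limpeza : (List (String × List String)) × String :=
  ([("a", ["x", "y"]), ("b", ["u", "v"])], "y")

def Spec_limpeza (dicti : List (String × List String)) (ref : String) (out : List (String × List String)) : Prop := out = limpeza_alt dicti ref
instance (dicti : List (String × List String)) (ref : String) (out : List (String × List String)) : Decidable (Spec_limpeza dicti ref out) := by unfold Spec_limpeza; infer_instance

-- ===== CLAIM (what is proved, stated in full; the proofs are below) =====
def Claim_equal_limpeza : Prop := ∀ (dicti : List (String × List String)) (ref : String), Dom_limpeza dicti ref → Pre_limpeza dicti ref → Spec_limpeza dicti ref (limpeza dicti ref)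

-- ===== LEMMAS AND PROOFS =====

-- A-SIDE: the first loop of A computes acc ++ keys of the matching entries
theorem lista_eq (ref : String) (dicti : List (String × List String)) (acc : List String) :
    dicti.foldl (fun acc kv => if PySem.List.pyGet? kv.2 1 == some ref then acc ++ [kv.1] else acc) acc
      = acc ++ (dicti.filter (fun kv => PySem.List.pyGet? kv.2 1 == some ref)).map Prod.fst := by
  induction dicti generalizing acc with
  | nil => simp
  | cons x xs ih =>
    by_cases h : (PySem.List.pyGet? x.2 1 == some ref) = true
    · rw [List.foldl_cons, if_pos h, ih]
      simp [List.filter_cons, h]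
    · rw [List.foldl_cons, if_neg h, ih]
      simp [List.filter_cons, h]

-- popping keys not equal to the head key skips the head
theorem foldl_popKey_cons (x : String × List String) (xs : List (String × List String))
    (ks : List String) (h : ∀ k ∈ ks, x.1 ≠ k) :
    ks.foldl (fun d item => popKey d item) (x :: xs)
      = x :: ks.foldl (fun d item => popKey d item) xs := by
  induction ks generalizing xs with
  | nil => rfl
  | cons k ks ih =>
    have hk : x.1 ≠ k := h k (List.mem_cons_self ..)
    have : popKey (x :: xs) k = x :: popKey xs k := by
      simp [popKey, hk]
    simp only [List.foldl, this]
    exact ih (popKey xs k) (fun k' hk' => h k' (List.mem_cons_of_mem _ hk'))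

-- popping exactly the matching keys of a nodup-keyed dict is filtering them out
theorem foldl_popKey_filter (ref : String) (dicti : List (String × List String))
    (hnd : (dicti.map Prod.fst).Nodup) :
    ((dicti.filter (fun kv => PySem.List.pyGet? kv.2 1 == some ref)).map Prod.fst).foldl
        (fun d item => popKey d item) dicti
      = dicti.filter (fun kv => !(PySem.List.pyGet? kv.2 1 == some ref)) := by
  induction dicti with
  | nil => rfl
  | cons x xs ih =>
    simp only [List.map_cons, List.nodup_cons] at hnd
    obtain ⟨hx, hxs⟩ := hnd
    by_cases h : (PySem.List.pyGet? x.2 1 == some ref) = true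
    · have hpop : popKey (x :: xs) x.1 = xs := by
        simp [popKey]
      simp only [List.filter_cons, h, List.map_cons, List.foldl, hpop, if_pos]
      rw [ih hxs]
      simp [h]
    · have hks : ∀ k ∈ (xs.filter (fun kv => PySem.List.pyGet? kv.2 1 == some ref)).map Prod.fst,
          x.1 ≠ k := by
        intro k hk
        simp only [List.mem_map, List.mem_filter] at hk
        obtain ⟨kv, ⟨hmem, _⟩, hkeq⟩ := hk
        intro hxk
        apply hx
        rw [hxk, ← hkeq]
        exact List.mem_map_of_mem hmem
      simp only [List.filter_cons, h, if_neg, Bool.not_eq_true]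
      rw [foldl_popKey_cons x xs _ hks, ih hxs]
      simp [h]

-- writing at index pre.length into pre ++ l replaces the head of l
theorem set_append_length {α : Type} (pre l : List α) (x : α) :
    (pre ++ l).set pre.length x = pre ++ l.set 0 x := by
  induction pre with
  | nil => rfl
  | cons p ps ih => simp [List.set, ih]

-- B-SIDE invariant: processing the suffix 'rest' starting at index kept.length +
-- junk.length, with the kept prefix already compacted before the junk, compacts
-- the kept entries of rest onto the junk region
theorem compact_inv (ref : String) (rest kept junk : List (String × List String)) :
    ∃ junk2 : List (String × List String),
      (PySem.List.pyRange ((kept.length + junk.length : Nat) : Int)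
          ((kept.length + junk.length + rest.length : Nat) : Int) 1).foldl
        (compactStep ref) (kept ++ junk ++ rest, kept.length)
      = (kept ++ rest.filter (fun kv => !(PySem.List.pyGet? kv.2 1 == some ref)) ++ junk2,
         (kept ++ rest.filter (fun kv => !(PySem.List.pyGet? kv.2 1 == some ref))).length) := by
  induction rest generalizing kept junk with
  | nil =>
    refine ⟨junk, ?_⟩
    rw [PySem.List.pyRange_one_eq_nil (by simp)]
    simp
  | cons x rest ih =>
    have hlen : (x :: rest).length = rest.length + 1 := List.length_cons ..
    have hlt : ((kept.length + junk.length : Nat) : Int)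
        < ((kept.length + junk.length + (x :: rest).length : Nat) : Int) := by
      exact_mod_cast (show kept.length + junk.length
        < kept.length + junk.length + (x :: rest).length by rw [hlen]; omega)
    rw [PySem.List.pyRange_one_cons hlt, List.foldl_cons]
    have hget : PySem.List.pyGet? (kept ++ junk ++ x :: rest)
        ((kept.length + junk.length : Nat) : Int) = some x := by
      have := PySem.List.pyGet?_append_length (pre := kept ++ junk) (y := x) (ys := rest)
      simpa [List.append_assoc] using this
    by_cases h : (PySem.List.pyGet? x.2 1 == some ref) = true
    · -- removed: state unchanged, x is absorbed into the junk region
      have hstep : compactStep ref (kept ++ junk ++ x :: rest, kept.length)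
          ((kept.length + junk.length : Nat) : Int) = (kept ++ junk ++ x :: rest, kept.length) := by
        simp only [compactStep, hget]
        rw [if_pos h]
      rw [hstep]
      obtain ⟨junk2, hj⟩ := ih kept (junk ++ [x])
      refine ⟨junk2, ?_⟩
      simp only [List.filter_cons, h, if_pos]
      simpa [List.length_append, List.length_cons, List.length_nil, List.append_assoc,
        Nat.add_assoc, Nat.add_comm, Nat.add_left_comm] using hj
    · -- kept: write x at the write pointer, advance it
      have hstep : compactStep ref (kept ++ junk ++ x :: rest, kept.length)
          ((kept.length + junk.length : Nat) : Int)
          = ((kept ++ junk ++ x :: rest).set kept.length x, kept.length + 1) := by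
        simp only [compactStep, hget]
        rw [if_neg h]
      rw [hstep]
      cases junk with
      | nil =>
        have hset : (kept ++ [] ++ x :: rest).set kept.length x
            = (kept ++ [x]) ++ [] ++ rest := by
          simp [set_append_length, List.set_cons_zero]
        rw [hset]
        obtain ⟨junk2, hj⟩ := ih (kept ++ [x]) []
        refine ⟨junk2, ?_⟩
        simp only [List.filter_cons, h, if_neg, Bool.not_eq_true]
        simpa [List.length_append, List.length_cons, List.length_nil, List.append_assoc,
          Nat.add_assoc, Nat.add_comm, Nat.add_left_comm] using hj
      | cons j0 js =>
        have hset : (kept ++ (j0 :: js) ++ x :: rest).set kept.length x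
            = (kept ++ [x]) ++ (js ++ [x]) ++ rest := by
          simp [set_append_length, List.set_cons_zero]
        rw [hset]
        obtain ⟨junk2, hj⟩ := ih (kept ++ [x]) (js ++ [x])
        refine ⟨junk2, ?_⟩
        simp only [List.filter_cons, h, if_neg, Bool.not_eq_true]
        simpa [List.length_append, List.length_cons, List.length_nil, List.append_assoc,
          Nat.add_assoc, Nat.add_comm, Nat.add_left_comm] using hj

-- B computes the keep-filter of the input
theorem limpeza_alt_eq_filter (dicti : List (String × List String)) (ref : String) :
    limpeza_alt dicti ref
      = dicti.filter (fun kv => !(PySem.List.pyGet? kv.2 1 == some ref)) := by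
  unfold limpeza_alt
  obtain ⟨junk2, hj⟩ := compact_inv ref dicti [] []
  simp only [List.length_nil, List.nil_append, List.append_nil, Nat.add_zero, Nat.zero_add,
    Nat.cast_zero, List.length_append] at hj
  rw [hj]
  simp [List.take_append]

-- ===== VERDICT (by name: the statement is the Claim_ definition above) =====
theorem limpeza_spec : Claim_equal_limpeza := by
  intro dicti ref _ hpre
  unfold Spec_limpeza limpeza
  rw [lista_eq, List.nil_append, foldl_popKey_filter ref dicti hpre.1, limpeza_alt_eq_filter]
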